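-- pv_equiv track=rewrite | github.com/joel-odlund/advent-of-code | 2023/5/5.py | single_map
-- ===== SOURCE A (Python) =====
-- def single_map(value, mapdefs):
--     if not mapdefs:
--         return value
--     target_range, source_range, range_size = mapdefs[0]
--     if value >= source_range and value < source_range + range_size:
--         f = value + target_range - source_range
--         return f
--     else:
--         return single_map(value, mapdefs[1:])
-- ===== SOURCE B (Python) =====
-- def single_map(value, mapdefs):
--     return next(
--         (value + target_range - source_range
--          for target_range, source_range, range_size in mapdefs
--          if source_range <= value < source_range + range_size),
--         value,
--     )
-- ===== Notes on version B (the rewrite author's own statement) =====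
-- stated objective: idiomatic
-- what changed: Replaced the slicing recursion with a single next() over a generator expression yielding the translated value for the first matching range, with the original value as the default.
import Mathlib
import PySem

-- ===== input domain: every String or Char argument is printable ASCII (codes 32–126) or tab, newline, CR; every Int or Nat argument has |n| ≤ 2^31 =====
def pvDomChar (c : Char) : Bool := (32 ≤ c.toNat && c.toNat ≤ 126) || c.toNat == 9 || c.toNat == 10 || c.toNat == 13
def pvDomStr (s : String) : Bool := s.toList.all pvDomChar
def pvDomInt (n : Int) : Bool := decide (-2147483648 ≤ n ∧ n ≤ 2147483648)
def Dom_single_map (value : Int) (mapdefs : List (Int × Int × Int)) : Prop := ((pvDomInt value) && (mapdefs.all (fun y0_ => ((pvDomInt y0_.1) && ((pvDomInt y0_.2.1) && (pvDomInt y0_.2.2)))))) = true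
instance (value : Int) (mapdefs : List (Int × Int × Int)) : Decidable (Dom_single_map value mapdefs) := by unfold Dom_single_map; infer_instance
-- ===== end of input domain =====

-- ===== PORT A =====
-- Port of A: recursion on the list, matching on the head triple and recursing on the tail.
def single_map (value : Int) (mapdefs : List (Int × Int × Int)) : Int :=
  match mapdefs with
  | [] => value
  | (target_range, source_range, range_size) :: rest =>
    if value ≥ source_range ∧ value < source_range + range_size then
      value + target_range - source_range
    else
      single_map value rest

-- ===== PORT B =====
-- Port of B: first matching range via findSome? (Python's next over a generator), default value.
def single_map_alt (value : Int) (mapdefs : List (Int × Int × Int)) : Int :=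
  (mapdefs.findSome? (fun t =>
    if t.2.1 ≤ value ∧ value < t.2.1 + t.2.2 then some (value + t.1 - t.2.1) else none)).getD value

-- ===== PRECONDITION & SPEC =====
def Spec_single_map (value : Int) (mapdefs : List (Int × Int × Int)) (out : Int) : Prop := out = single_map_alt value mapdefs
instance (value : Int) (mapdefs : List (Int × Int × Int)) (out : Int) : Decidable (Spec_single_map value mapdefs out) := by unfold Spec_single_map; infer_instance

-- ===== CLAIM (what is proved, stated in full; the proofs are below) =====
def Claim_equal_single_map : Prop := ∀ (value : Int) (mapdefs : List (Int × Int × Int)), Dom_single_map value mapdefs → Spec_single_map value mapdefs (single_map value mapdefs)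

-- ===== LEMMAS AND PROOFS =====

-- ===== VERDICT (by name: the statement is the Claim_ definition above) =====
theorem single_map_spec : Claim_equal_single_map := by
  intro value mapdefs hdom
  clear hdom
  unfold Spec_single_map
  induction mapdefs with
  | nil => rfl
  | cons hd tl ih =>
    obtain ⟨t, s, n⟩ := hd
    simp only [single_map, single_map_alt, List.findSome?]
    by_cases h : s ≤ value ∧ value < s + n
    · simp [h, and_comm]
    · have h' : ¬ (value ≥ s ∧ value < s + n) := by tauto
      simp only [if_neg h, if_neg h']
      exact ih
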